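-- pv_equiv track=rewrite | github.com/Haaaam/PS | Programmers/basic/배열_조각하.py | solution
-- ===== SOURCE A (Python) =====
-- def solution(arr, query):
--     for i in range(len(query)):
--
--         a = query[i]
--         if i % 2 == 0:
--
--             arr = arr[:a + 1]
--
--         else:
--             arr = arr[a:]
--     return arr
-- ===== SOURCE B (Python) =====
-- def solution(arr, query):
--     # Track the current window [lo, hi) of the original array and slice once at the end
--     # (index arithmetic per query, one slice at the end instead of one per query).
--     lo, hi = 0, len(arr)
--     for i, a in enumerate(query):
--         m = hi - lo
--         if i % 2 == 0:
--             b = a + 1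
--             if b < 0:
--                 b += m
--             hi = lo + min(max(b, 0), m)
--         else:
--             s = a
--             if s < 0:
--                 s += m
--             lo = lo + min(max(s, 0), m)
--     return arr[lo:hi]
-- ===== Notes on version B (the rewrite author's own statement) =====
-- stated objective: alternative
-- what changed: Instead of materialising a new list slice for every query, B tracks the current window as a pair of indices (lo, hi) into the original array, updates them per query with Python's slice-clamping arithmetic, and slices once at the end; it avoids A's repeated copying but its per-query index arithmetic runs in interpreted Python, so it is not measurably faster.
import Mathlib
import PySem

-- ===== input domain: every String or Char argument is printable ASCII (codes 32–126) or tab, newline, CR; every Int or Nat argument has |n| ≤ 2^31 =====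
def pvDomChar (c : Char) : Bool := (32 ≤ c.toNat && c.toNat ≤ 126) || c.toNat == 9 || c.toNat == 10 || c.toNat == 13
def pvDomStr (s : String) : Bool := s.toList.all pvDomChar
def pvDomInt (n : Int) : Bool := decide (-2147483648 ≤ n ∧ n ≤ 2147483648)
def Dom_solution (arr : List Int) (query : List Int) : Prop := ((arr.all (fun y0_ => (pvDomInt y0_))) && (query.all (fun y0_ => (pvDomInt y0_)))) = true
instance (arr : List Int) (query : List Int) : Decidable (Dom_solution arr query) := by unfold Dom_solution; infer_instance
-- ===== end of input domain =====

-- B tracks the current window [lo, hi) of the original array as a pair of indices, updating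
-- them per query, and slices once at the end, instead of A's materialising a slice per query.

-- ===== PORT A =====
-- loop body of A: at index i with value a, slice the accumulator
def pvStepA (acc : List Int) (p : Int × Int) : List Int :=
  if p.1 % 2 == 0 then PySem.List.slice acc none (some (p.2 + 1))
  else PySem.List.slice acc (some p.2) none

def solution (arr : List Int) (query : List Int) : List Int :=
  (PySem.List.pyRange 0 (query.length : Int) 1).foldl
    (fun acc i => pvStepA acc (i, PySem.List.pyGetD query i 0))
    arr

-- ===== PORT B =====
-- loop body of B: update the (lo, hi) window for one query
def pvStepB (st : Int × Int) (p : Int × Int) : Int × Int :=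
  let m := st.2 - st.1
  if p.1 % 2 == 0 then
    let b := p.2 + 1
    let b := if b < 0 then b + m else b
    (st.1, st.1 + min (max b 0) m)
  else
    let s := p.2
    let s := if s < 0 then s + m else s
    (st.1 + min (max s 0) m, st.2)

def solution_alt (arr : List Int) (query : List Int) : List Int :=
  let st := (PySem.List.enumerate query 0).foldl pvStepB (0, (arr.length : Int))
  PySem.List.slice arr (some st.1) (some st.2)

-- ===== PRECONDITION & SPEC =====
def Spec_solution (arr : List Int) (query : List Int) (out : List Int) : Prop := out = solution_alt arr query
instance (arr : List Int) (query : List Int) (out : List Int) : Decidable (Spec_solution arr query out) := by unfold Spec_solution; infer_instance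

-- ===== CLAIM (what is proved, stated in full; the proofs are below) =====
def Claim_equal_solution : Prop := ∀ (arr : List Int) (query : List Int), Dom_solution arr query → Spec_solution arr query (solution arr query)

-- ===== LEMMAS AND PROOFS =====

-- Python xs[:b] as take of a clamped Nat count
lemma slice_to_eq (xs : List Int) (b : Int) :
    PySem.List.slice xs none (some b)
      = xs.take (if b < 0 then (b + xs.length).toNat else b.toNat) := by
  by_cases hb : b < 0
  · have hk : b = -((((-b).toNat : Nat) : Int)) := by omega
    rw [if_pos hb, hk, PySem.List.slice_to_neg_natCast _ _ (by omega)]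
    congr 1
    omega
  · rw [if_neg hb, PySem.List.slice_to xs (by omega)]

-- Python xs[a:] as drop of a clamped Nat count
lemma slice_from_eq (xs : List Int) (a : Int) :
    PySem.List.slice xs (some a) none
      = xs.drop (if a < 0 then (a + xs.length).toNat else a.toNat) := by
  by_cases ha : a < 0
  · have hk : a = -((((-a).toNat : Nat) : Int)) := by omega
    rw [if_pos ha, hk, PySem.List.slice_from_neg_natCast _ _ (by omega)]
    congr 1
    omega
  · rw [if_neg ha, PySem.List.slice_from xs (by omega)]

-- invariant preservation for one B step
lemma pvStepB_inv (lo hi : Int) (p : Int × Int) (L : Int)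
    (h0 : 0 ≤ lo) (h1 : lo ≤ hi) (h2 : hi ≤ L) :
    0 ≤ (pvStepB (lo, hi) p).1 ∧ (pvStepB (lo, hi) p).1 ≤ (pvStepB (lo, hi) p).2 ∧
      (pvStepB (lo, hi) p).2 ≤ L := by
  unfold pvStepB
  by_cases hp : p.1 % 2 == 0 <;> simp only [hp, Bool.false_eq_true,
    reduceIte] <;> split_ifs <;> refine ⟨?_, ?_, ?_⟩ <;> dsimp only <;> omega

-- one even step agrees on the window
lemma step_window (xs : List Int) (lo hi : Int) (p : Int × Int)
    (h0 : 0 ≤ lo) (h1 : lo ≤ hi) (h2 : hi ≤ (xs.length : Int)) :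
    pvStepA ((xs.drop lo.toNat).take (hi - lo).toNat) p
      = (xs.drop (pvStepB (lo, hi) p).1.toNat).take
          ((pvStepB (lo, hi) p).2 - (pvStepB (lo, hi) p).1).toNat := by
  have hlen : ((xs.drop lo.toNat).take (hi - lo).toNat).length = (hi - lo).toNat := by
    simp only [List.length_take, List.length_drop]
    omega
  unfold pvStepA pvStepB
  by_cases hp : p.1 % 2 == 0 <;>
    simp only [hp, Bool.false_eq_true, reduceIte]
  · -- even: take on both sides
    rw [slice_to_eq, hlen, List.take_take]
    congr 1
    split_ifs <;> omega
  · -- odd: drop inside the take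
    rw [slice_from_eq, hlen, List.drop_take, List.drop_drop]
    by_cases hk : (if p.2 < 0 then (p.2 + ((hi - lo).toNat : Int)).toNat else p.2.toNat)
        ≤ (hi - lo).toNat
    · have hlo : lo.toNat + (if p.2 < 0 then (p.2 + ((hi - lo).toNat : Int)).toNat else p.2.toNat)
          = ((lo + min (max (if p.2 < 0 then p.2 + (hi - lo) else p.2) 0) (hi - lo))).toNat := by
        split_ifs at * <;> omega
      have hcnt : (hi - lo).toNat - (if p.2 < 0 then (p.2 + ((hi - lo).toNat : Int)).toNat else p.2.toNat)
          = (hi - (lo + min (max (if p.2 < 0 then p.2 + (hi - lo) else p.2) 0) (hi - lo))).toNat := by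
        split_ifs at * <;> omega
      rw [hlo, hcnt]
    · -- both take-counts are zero
      have hA : (hi - lo).toNat - (if p.2 < 0 then (p.2 + ((hi - lo).toNat : Int)).toNat else p.2.toNat) = 0 := by
        split_ifs at * <;> omega
      have hB : (hi - (lo + min (max (if p.2 < 0 then p.2 + (hi - lo) else p.2) 0) (hi - lo))).toNat = 0 := by
        split_ifs at * <;> omega
      rw [hA, hB]
      simp

-- the two folds agree on the window, for any list of (index, value) pairs
lemma fold_window (xs : List Int) (ps : List (Int × Int)) :
    ∀ (lo hi : Int), 0 ≤ lo → lo ≤ hi → hi ≤ (xs.length : Int) →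
    ps.foldl pvStepA ((xs.drop lo.toNat).take (hi - lo).toNat)
      = (xs.drop (ps.foldl pvStepB (lo, hi)).1.toNat).take
          ((ps.foldl pvStepB (lo, hi)).2 - (ps.foldl pvStepB (lo, hi)).1).toNat := by
  induction ps with
  | nil => intro lo hi h0 h1 h2; simp
  | cons p ps ih =>
    intro lo hi h0 h1 h2
    simp only [List.foldl_cons]
    obtain ⟨i0, i1, i2⟩ := pvStepB_inv lo hi p (xs.length : Int) h0 h1 h2
    rw [step_window xs lo hi p h0 h1 h2]
    have := ih (pvStepB (lo, hi) p).1 (pvStepB (lo, hi) p).2 i0 i1 i2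
    simpa using this

-- final-state invariant for the whole fold
lemma fold_inv (L : Int) (ps : List (Int × Int)) :
    ∀ (lo hi : Int), 0 ≤ lo → lo ≤ hi → hi ≤ L →
    0 ≤ (ps.foldl pvStepB (lo, hi)).1 ∧
      (ps.foldl pvStepB (lo, hi)).1 ≤ (ps.foldl pvStepB (lo, hi)).2 ∧
      (ps.foldl pvStepB (lo, hi)).2 ≤ L := by
  induction ps with
  | nil => intro lo hi h0 h1 h2; exact ⟨h0, h1, h2⟩
  | cons p ps ih =>
    intro lo hi h0 h1 h2
    obtain ⟨i0, i1, i2⟩ := pvStepB_inv lo hi p L h0 h1 h2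
    simpa using ih (pvStepB (lo, hi) p).1 (pvStepB (lo, hi) p).2 i0 i1 i2

-- A's fold over range/indexing is the fold over enumerate
lemma solution_eq_fold (arr query : List Int) :
    solution arr query = (PySem.List.enumerate query 0).foldl pvStepA arr := by
  rw [solution, PySem.List.enumerate_eq_map_pyRange query 0, List.foldl_map]
  rfl

-- ===== VERDICT (by name: the statement is the Claim_ definition above) =====
theorem solution_spec : Claim_equal_solution := by
  intro arr query _
  unfold Spec_solution
  rw [solution_eq_fold, solution_alt]
  have h := fold_window arr (PySem.List.enumerate query 0) 0 (arr.length : Int)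
    (by omega) (by exact_mod_cast Int.natCast_nonneg arr.length) (le_refl _)
  have hw : (arr.drop (0 : Int).toNat).take (((arr.length : Int) - 0)).toNat = arr := by
    simp
  rw [hw] at h
  obtain ⟨i0, i1, i2⟩ := fold_inv (arr.length : Int) (PySem.List.enumerate query 0) 0
    (arr.length : Int) le_rfl (by exact_mod_cast Int.natCast_nonneg arr.length) (le_refl _)
  rw [h, PySem.List.slice_toNat arr i0 (le_trans i0 i1)]
  congr 1
  omega
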